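-- pv_equiv track=rewrite | github.com/rf-iasys/OEIS | OEIS_A006012.py | A006012
-- ===== SOURCE A (Python) =====
-- def A006012(n):
--     marked = []
--     current = 1
--     k = 2
--
--     while len(marked) < n:
--         marked.append((k+1)//3)
--         k += k + current
--         current += k + 1
--
--     return marked
-- ===== SOURCE B (Python) =====
-- def A006012(n):
--     if n <= 0:
--         return []
--     if n == 1:
--         return [1]
--     terms = [1, 2]
--     a, b = 1, 2
--     while len(terms) < n:
--         a, b = b, 4 * b - 2 * a
--         terms.append(b)
--     return terms
-- ===== Notes on version B (the rewrite author's own statement) =====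
-- stated objective: simpler
-- what changed: B generates the terms directly from the standard linear recurrence a(n)=4*a(n-1)-2*a(n-2) with seeds 1,2, keeping only the last two terms, instead of A's (k,current) bookkeeping with (k+1)//3 extraction.
import Mathlib
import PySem

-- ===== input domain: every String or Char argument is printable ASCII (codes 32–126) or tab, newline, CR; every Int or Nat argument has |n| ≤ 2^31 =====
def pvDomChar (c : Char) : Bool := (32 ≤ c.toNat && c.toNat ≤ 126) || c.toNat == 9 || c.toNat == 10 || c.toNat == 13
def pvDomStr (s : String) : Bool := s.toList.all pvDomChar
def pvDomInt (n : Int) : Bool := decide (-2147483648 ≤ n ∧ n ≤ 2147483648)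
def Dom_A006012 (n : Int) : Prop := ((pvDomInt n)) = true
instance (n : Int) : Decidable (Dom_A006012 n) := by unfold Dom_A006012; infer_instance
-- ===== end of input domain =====

-- B replaces A's (k,current) bookkeeping with the standard recurrence a(n)=4*a(n-1)-2*a(n-2); same cost, simpler.

-- ===== PORT A =====
-- A's while loop: append (k+1)//3, then k += k+current, then current += k+1
def goA (n : Int) (marked : List Int) (current k : Int) : List Int :=
  if (marked.length : Int) < n then
    goA n (marked ++ [PySem.Int.floordiv (k + 1) 3]) (current + ((k + (k + current)) + 1)) (k + (k + current))
  else marked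
termination_by (n - marked.length).toNat
decreasing_by simp_all; omega

def A006012 (n : Int) : List Int := goA n [] 1 2

-- ===== PORT B =====
def goB (n : Int) (terms : List Int) (a b : Int) : List Int :=
  if (terms.length : Int) < n then
    goB n (terms ++ [4 * b - 2 * a]) b (4 * b - 2 * a)
  else terms
termination_by (n - terms.length).toNat
decreasing_by simp_all; omega

def A006012_alt (n : Int) : List Int :=
  if n ≤ 0 then []
  else if n = 1 then [1]
  else goB n [1, 2] 1 2

-- ===== PRECONDITION & SPEC =====
def Spec_A006012 (n : Int) (out : List Int) : Prop := out = A006012_alt n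
instance (n : Int) (out : List Int) : Decidable (Spec_A006012 n out) := by unfold Spec_A006012; infer_instance

-- ===== CLAIM (what is proved, stated in full; the proofs are below) =====
def Claim_equal_A006012 : Prop := ∀ (n : Int), Dom_A006012 n → Spec_A006012 n (A006012 n)

-- ===== LEMMAS AND PROOFS =====

-- Invariant linking A's loop state to B's: if the last two generated terms are a, b,
-- then A's current = 18b - 12a + 1 and A's k = 12b - 6a - 1.
theorem go_eq (n : Int) (acc : List Int) (a b : Int) :
    goA n acc (18 * b - 12 * a + 1) (12 * b - 6 * a - 1) = goB n acc a b := by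
  unfold goA goB
  by_cases h : (acc.length : Int) < n
  · simp only [if_pos h]
    have hdiv : PySem.Int.floordiv (12 * b - 6 * a - 1 + 1) 3 = 4 * b - 2 * a := by
      have h3 : 12 * b - 6 * a - 1 + 1 = 3 * (4 * b - 2 * a) := by ring
      rw [h3, PySem.Int.floordiv_eq_ediv_of_pos (by norm_num)]
      omega
    rw [hdiv]
    have h1 : (18 * b - 12 * a + 1) + (((12 * b - 6 * a - 1) + ((12 * b - 6 * a - 1) + (18 * b - 12 * a + 1))) + 1)
        = 18 * (4 * b - 2 * a) - 12 * b + 1 := by ring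
    have h2 : (12 * b - 6 * a - 1) + ((12 * b - 6 * a - 1) + (18 * b - 12 * a + 1))
        = 12 * (4 * b - 2 * a) - 6 * b - 1 := by ring
    rw [h1, h2]
    exact go_eq n (acc ++ [4 * b - 2 * a]) b (4 * b - 2 * a)
  · simp only [if_neg h]
termination_by (n - acc.length).toNat
decreasing_by simp_all; omega

-- ===== VERDICT (by name: the statement is the Claim_ definition above) =====
theorem A006012_spec : Claim_equal_A006012 := by
  intro n _
  unfold Spec_A006012 A006012 A006012_alt
  by_cases h0 : n ≤ 0
  · rw [goA]
    simp only [List.length_nil, Int.natCast_zero]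
    rw [if_neg (by omega), if_pos h0]
  · by_cases h1 : n = 1
    · subst h1
      rw [goA]; simp only [List.length_nil, Int.natCast_zero, if_pos (by norm_num : (0:Int) < 1)]
      rw [goA]; norm_num
    · rw [if_neg h0, if_neg h1]
      have step1 : goA n [] 1 2 = goA n [1] 7 5 := by
        rw [goA]; simp only [List.length_nil, Int.natCast_zero, if_pos (by omega : (0:Int) < n)]
        norm_num [PySem.Int.floordiv]
      have step2 : goA n [1] 7 5 = goA n [1, 2] 25 17 := by
        rw [goA]; simp only [List.length_cons, List.length_nil]
        rw [if_pos (by omega : ((1:Nat) : Int) < n)]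
        norm_num [PySem.Int.floordiv]
        rw [show Int.fdiv 6 3 = 2 by decide]
      rw [step1, step2]
      have := go_eq n [1, 2] 1 2
      norm_num at this
      convert this using 2
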